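-- pv_equiv track=rewrite | github.com/beinganuvesh/Cheatsheet-DS-ALGO | Second Attempt.py | CanCook
-- ===== SOURCE A (Python) =====
-- def CanCook(arr, p, allowed):
--     n=len(arr)
--     time=0
--     paratha=0
--
--     for i in range(0, n):
--         time=arr[i]
--         j=2
--         while time<=allowed:
--             paratha+=1
--             time+=(j*arr[i])
--             j+=1
--         if paratha>=p:
--             return True
--
--     return False
-- ===== SOURCE B (Python) =====
-- def CanCook(arr, p, allowed):
--     total = 0
--     for a in arr:
--         if a <= allowed:
--             # binary search: largest m >= 1 with a*m*(m+1)/2 <= allowed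
--             lo, hi = 1, allowed // a
--             while lo < hi:
--                 mid = (lo + hi + 1) // 2
--                 if a * mid * (mid + 1) <= 2 * allowed:
--                     lo = mid
--                 else:
--                     hi = mid - 1
--             total += lo
--     return total >= p
-- ===== Notes on version B (the rewrite author's own statement) =====
-- stated objective: faster
-- what changed: Replaces the per-chef step-by-step simulation of cooking times by a binary search for the largest m with a*m*(m+1)/2 <= allowed, and replaces the early-exit prefix check by comparing the total count to p (valid since per-chef counts are nonnegative); intended as faster — a timing run saw A time out at n=16 where B returned, but could not measure a clean ratio.
-- intended difference: On arr = [] with p <= 0, A returns False although zero parathas already satisfy a nonpositive demand; B returns True, the intended value. — e.g. on CanCook([], 0, 5): A returns false, B returns true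
-- outside the precondition, e.g. on CanCook([1, 0], 1, 5): A returns True, B raises ZeroDivisionError
import Mathlib
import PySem

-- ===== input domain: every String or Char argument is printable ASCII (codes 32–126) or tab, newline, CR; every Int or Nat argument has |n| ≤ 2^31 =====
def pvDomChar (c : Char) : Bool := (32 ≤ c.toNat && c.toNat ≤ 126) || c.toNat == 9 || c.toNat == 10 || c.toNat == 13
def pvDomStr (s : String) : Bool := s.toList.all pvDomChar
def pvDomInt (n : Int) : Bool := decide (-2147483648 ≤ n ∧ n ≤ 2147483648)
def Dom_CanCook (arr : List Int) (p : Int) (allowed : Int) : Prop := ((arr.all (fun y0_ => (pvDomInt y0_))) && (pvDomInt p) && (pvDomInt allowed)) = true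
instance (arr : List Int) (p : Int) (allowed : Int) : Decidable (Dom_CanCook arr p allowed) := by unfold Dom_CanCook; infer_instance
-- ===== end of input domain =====

-- B replaces A's per-chef step simulation by a binary search on the paratha count and the
-- early-exit prefix check by a single total-vs-p comparison; intended as faster (the timing
-- run saw A time out at n=16 where B returned, but could not measure a clean ratio).

-- ===== PORT A =====
-- inner while loop of A: `while time<=allowed: paratha+=1; time+=j*arr[i]; j+=1`
-- (fuel only makes the recursion total; within Pre_ the fuel is never exhausted)
def CanCookLoop (a allowed : Int) : Nat → Int → Int → Int → Int
  | 0, _, _, paratha => paratha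
  | fuel+1, time, j, paratha =>
    if time ≤ allowed then CanCookLoop a allowed fuel (time + j * a) (j + 1) (paratha + 1)
    else paratha

-- the `for i in range(0, n)` loop with its early `return True`
def CanCookGo (p allowed : Int) : List Int → Int → Bool
  | [], _ => false
  | a :: rest, paratha =>
    let paratha' := CanCookLoop a allowed (allowed.toNat + 2) a 2 paratha
    if p ≤ paratha' then true else CanCookGo p allowed rest paratha'

def CanCook (arr : List Int) (p : Int) (allowed : Int) : Bool :=
  CanCookGo p allowed arr 0

-- ===== PORT B =====
-- Source B's while loop: binary search for the largest m ≥ 1 with a*m*(m+1) ≤ 2*allowed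
-- (fuel only makes the recursion total; within Pre_ the fuel is never exhausted)
def CanCookBS (a allowed : Int) : Nat → Int → Int → Int
  | 0, lo, _ => lo
  | fuel+1, lo, hi =>
    if lo < hi then
      if a * (PySem.Int.floordiv (lo + hi + 1) 2) * (PySem.Int.floordiv (lo + hi + 1) 2 + 1) ≤ 2 * allowed then
        CanCookBS a allowed fuel (PySem.Int.floordiv (lo + hi + 1) 2) hi
      else CanCookBS a allowed fuel lo (PySem.Int.floordiv (lo + hi + 1) 2 - 1)
    else lo

def CanCook_alt (arr : List Int) (p : Int) (allowed : Int) : Bool :=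
  let total := arr.foldl (fun total a =>
    if a ≤ allowed then
      total + CanCookBS a allowed (allowed.toNat + 2) 1 (PySem.Int.floordiv allowed a)
    else total) 0
  decide (p ≤ total)

-- ===== PRECONDITION & SPEC =====
-- Pre_ excludes lists containing a non-positive rank a with a ≤ allowed: there A's inner
-- while loop never terminates for that chef (A returns only when an earlier chef already
-- triggered the early exit), and B's division `allowed // a` is meaningless or raises.
def Pre_CanCook (arr : List Int) (p : Int) (allowed : Int) : Prop :=
  ∀ a ∈ arr, 0 < a ∨ allowed < a
instance (arr : List Int) (p : Int) (allowed : Int) : Decidable (Pre_CanCook arr p allowed) := by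
  unfold Pre_CanCook; infer_instance

def pvWitness_CanCook : List Int × Int × Int := ([3, 2, 5], 10, 30)

-- On arr = [] with p ≤ 0, A returns False although zero parathas already satisfy a
-- nonpositive demand; B returns True, the intended value.
def D_CanCook (arr : List Int) (p : Int) (allowed : Int) : Prop := arr = [] ∧ p ≤ 0
instance (arr : List Int) (p : Int) (allowed : Int) : Decidable (D_CanCook arr p allowed) := by
  unfold D_CanCook; infer_instance

def Spec_CanCook (arr : List Int) (p : Int) (allowed : Int) (out : Bool) : Prop :=
  ¬ D_CanCook arr p allowed → out = CanCook_alt arr p allowed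
instance (arr : List Int) (p : Int) (allowed : Int) (out : Bool) : Decidable (Spec_CanCook arr p allowed out) := by
  unfold Spec_CanCook; infer_instance

def pvDiffWitness_CanCook : List Int × Int × Int := ([], 0, 5)
def pvDiffWitnessOut_CanCook : Bool × Bool := (false, true)

-- ===== CLAIM (what is proved, stated in full; the proofs are below) =====
def Claim_unchanged_CanCook : Prop := ∀ (arr : List Int) (p : Int) (allowed : Int), Dom_CanCook arr p allowed → Pre_CanCook arr p allowed → Spec_CanCook arr p allowed (CanCook arr p allowed)
def Claim_changed_CanCook : Prop := Dom_CanCook (pvDiffWitness_CanCook.1) (pvDiffWitness_CanCook.2.1) (pvDiffWitness_CanCook.2.2) ∧ Pre_CanCook (pvDiffWitness_CanCook.1) (pvDiffWitness_CanCook.2.1) (pvDiffWitness_CanCook.2.2) ∧ D_CanCook (pvDiffWitness_CanCook.1) (pvDiffWitness_CanCook.2.1) (pvDiffWitness_CanCook.2.2) ∧ CanCook (pvDiffWitness_CanCook.1) (pvDiffWitness_CanCook.2.1) (pvDiffWitness_CanCook.2.2) = pvDiffWitnessOut_CanCook.1 ∧ CanCook_alt (pvDiffWitness_CanCook.1) (pvDiffWitness_CanCook.2.1)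 (pvDiffWitness_CanCook.2.2) = pvDiffWitnessOut_CanCook.2 ∧ pvDiffWitnessOut_CanCook.1 ≠ pvDiffWitnessOut_CanCook.2
def Claim_exact_CanCook : Prop := ∀ (arr : List Int) (p : Int) (allowed : Int), Dom_CanCook arr p allowed → Pre_CanCook arr p allowed → D_CanCook arr p allowed → CanCook arr p allowed ≠ CanCook_alt arr p allowed

-- ===== LEMMAS AND PROOFS =====

-- the per-chef paratha-count predicate: m parathas fit iff a*m*(m+1) ≤ 2*allowed
def PFit (a allowed m : Int) : Prop := a * m * (m + 1) ≤ 2 * allowed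

-- per-chef count as B computes it
def cntB (allowed a : Int) : Int :=
  if a ≤ allowed then CanCookBS a allowed (allowed.toNat + 2) 1 (PySem.Int.floordiv allowed a)
  else 0

lemma CanCookBS_spec (a allowed : Int) (ha : 0 < a) :
    ∀ (fuel : Nat) (lo hi : Int), (hi - lo).toNat < fuel → 1 ≤ lo → lo ≤ hi →
    PFit a allowed lo → ¬ PFit a allowed (hi + 1) →
    1 ≤ CanCookBS a allowed fuel lo hi ∧ CanCookBS a allowed fuel lo hi ≤ hi ∧
    PFit a allowed (CanCookBS a allowed fuel lo hi) ∧
    ¬ PFit a allowed (CanCookBS a allowed fuel lo hi + 1) := by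
  intro fuel
  induction fuel with
  | zero => intro lo hi h; omega
  | succ f ih =>
    intro lo hi hfuel hlo hlohi hPlo hPhi
    by_cases hlt : lo < hi
    · have hmid : PySem.Int.floordiv (lo + hi + 1) 2 = (lo + hi + 1) / 2 :=
        PySem.Int.floordiv_eq_ediv_of_pos (by norm_num)
      have hb1 : lo < PySem.Int.floordiv (lo + hi + 1) 2 := by rw [hmid]; omega
      have hb2 : PySem.Int.floordiv (lo + hi + 1) 2 ≤ hi := by rw [hmid]; omega
      by_cases hP : a * (PySem.Int.floordiv (lo + hi + 1) 2) * (PySem.Int.floordiv (lo + hi + 1) 2 + 1) ≤ 2 * allowed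
      · have hun : CanCookBS a allowed (f+1) lo hi = CanCookBS a allowed f (PySem.Int.floordiv (lo + hi + 1) 2) hi := by
          simp only [CanCookBS]; rw [if_pos hlt, if_pos hP]
        rw [hun]
        exact ih _ hi (by omega) (by omega) hb2 hP hPhi
      · have hun : CanCookBS a allowed (f+1) lo hi = CanCookBS a allowed f lo (PySem.Int.floordiv (lo + hi + 1) 2 - 1) := by
          simp only [CanCookBS]; rw [if_pos hlt, if_neg hP]
        rw [hun]
        have hP' : ¬ PFit a allowed (PySem.Int.floordiv (lo + hi + 1) 2 - 1 + 1) := by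
          unfold PFit
          have he : PySem.Int.floordiv (lo + hi + 1) 2 - 1 + 1 = PySem.Int.floordiv (lo + hi + 1) 2 := by ring
          rw [he]; exact hP
        obtain ⟨h1, h2, h3, h4⟩ := ih lo (PySem.Int.floordiv (lo + hi + 1) 2 - 1) (by omega) hlo (by omega) hPlo hP'
        exact ⟨h1, by omega, h3, h4⟩
    · have : lo = hi := by omega
      subst this
      simp only [CanCookBS, hlt, if_false]
      exact ⟨hlo, le_refl _, hPlo, hPhi⟩

lemma CanCookLoop_spec (a allowed : Int) (ha : 0 < a) :
    ∀ (fuel : Nat) (r : Nat) (j time paratha : Int), r < fuel → 2 ≤ j →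
    2 * time = a * (j - 1) * j →
    (r = 0 ∨ a * (j + r - 2) * (j + r - 1) ≤ 2 * allowed) →
    ¬ (a * (j + r - 1) * (j + r) ≤ 2 * allowed) →
    CanCookLoop a allowed fuel time j paratha = paratha + r := by
  intro fuel
  induction fuel with
  | zero => intro r j time paratha h; omega
  | succ f ih =>
    intro r j time paratha hfuel hj htime hlow hhigh
    by_cases hcond : time ≤ allowed
    · have hstep : a * (j - 1) * j ≤ 2 * allowed := by linarith
      cases r with
      | zero =>
        exfalso; apply hhigh
        push_cast
        have : j + 0 - 1 = j - 1 := by ring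
        calc a * (j + (0:Int) - 1) * (j + 0) = a * (j - 1) * j := by ring
          _ ≤ 2 * allowed := hstep
      | succ r' =>
        have hrec := ih r' (j + 1) (time + j * a) (paratha + 1) (by omega) (by omega)
          (by nlinarith) ?_ ?_
        · simp only [CanCookLoop, hcond, if_true]
          rw [hrec]; push_cast; ring
        · right
          rcases hlow with h0 | h1
          · omega
          · have : (↑(r' + 1) : Int) = ↑r' + 1 := by push_cast; ring
            calc a * (j + 1 + ↑r' - 2) * (j + 1 + ↑r' - 1)
                = a * (j + ↑(r' + 1) - 2) * (j + ↑(r' + 1) - 1) := by push_cast; ring_nf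
              _ ≤ 2 * allowed := h1
        · intro hcontra; apply hhigh
          calc a * (j + ↑(r' + 1) - 1) * (j + ↑(r' + 1))
              = a * (j + 1 + ↑r' - 1) * (j + 1 + ↑r') := by push_cast; ring_nf
            _ ≤ 2 * allowed := hcontra
    · -- time > allowed: loop exits immediately; r must be 0
      have hgt : 2 * allowed < a * (j - 1) * j := by linarith
      cases r with
      | zero => simp [CanCookLoop, hcond]
      | succ r' =>
        exfalso
        rcases hlow with h0 | h1
        · omega
        · have hr' : (0:Int) ≤ ↑r' := by positivity
          have hcast : (↑(r' + 1) : Int) = ↑r' + 1 := by push_cast; ring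
          rw [hcast] at h1
          nlinarith [mul_nonneg (mul_nonneg ha.le hr') (show (0:Int) ≤ 2 * j - 1 + ↑r' by omega)]

-- per-chef: A's loop adds exactly cntB, and cntB is nonnegative
lemma chef_eq (a allowed : Int) (hPre : 0 < a ∨ allowed < a) :
    (∀ c : Int, CanCookLoop a allowed (allowed.toNat + 2) a 2 c = c + cntB allowed a) ∧
    0 ≤ cntB allowed a := by
  by_cases hle : a ≤ allowed
  · have ha : 0 < a := by
      rcases hPre with h | h
      · exact h
      · omega
    have hk : PySem.Int.floordiv allowed a = allowed / a :=
      PySem.Int.floordiv_eq_ediv_of_pos ha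
    have hdm := Int.ediv_add_emod allowed a
    have hm0 := Int.emod_nonneg allowed (show a ≠ 0 by omega)
    have hm1 := Int.emod_lt_of_pos allowed ha
    have hk1 : 1 ≤ allowed / a := (Int.le_ediv_iff_mul_le ha).mpr (by omega)
    have hka : a * (allowed / a) ≤ allowed := by linarith
    have hkup : allowed < a * (allowed / a) + a := by linarith
    have hkal : allowed / a ≤ allowed := by
      nlinarith [mul_nonneg (show (0:Int) ≤ a - 1 by omega) (show (0:Int) ≤ allowed / a by omega)]
    have hP1 : PFit a allowed 1 := by unfold PFit; linarith
    have hPk1 : ¬ PFit a allowed (allowed / a + 1) := by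
      unfold PFit; intro hcon
      nlinarith [mul_nonneg (mul_nonneg ha.le (show (0:Int) ≤ allowed / a + 1 by omega))
        (show (0:Int) ≤ allowed / a - 1 by omega)]
    obtain ⟨res, hres⟩ : ∃ r, CanCookBS a allowed (allowed.toNat + 2) 1 (allowed / a) = r := ⟨_, rfl⟩
    obtain ⟨hr1, hrk, hrP, hrP1⟩ := hres ▸
      CanCookBS_spec a allowed ha (allowed.toNat + 2) 1 (allowed / a) (by omega) (le_refl 1) hk1 hP1 hPk1
    have hcnt : cntB allowed a = res := by unfold cntB; rw [if_pos hle, hk, hres]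
    have hres0 : (0:Int) ≤ res := by omega
    have hcast : ((res.toNat : Int)) = res := Int.toNat_of_nonneg hres0
    constructor
    · intro c
      have hloop := CanCookLoop_spec a allowed ha (allowed.toNat + 2) res.toNat 2 a c
        (by omega) (le_refl 2) (by ring)
        (by right
            rw [hcast]
            have h := hrP; unfold PFit at h
            nlinarith [h])
        (by rw [hcast]
            intro hcon
            apply hrP1
            unfold PFit
            nlinarith [hcon])
      rw [hloop, hcast, hcnt]
    · rw [hcnt]; omega
  · -- a > allowed: A's loop exits at once, B skips the chef
    have hcnt : cntB allowed a = 0 := by unfold cntB; rw [if_neg hle]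
    constructor
    · intro c
      show CanCookLoop a allowed (allowed.toNat + 1 + 1) a 2 c = c + cntB allowed a
      simp [CanCookLoop, hle, hcnt]
    · rw [hcnt]

lemma foldl_cntB (allowed : Int) :
    ∀ (l : List Int) (c : Int),
    l.foldl (fun total a =>
      if a ≤ allowed then
        total + CanCookBS a allowed (allowed.toNat + 2) 1 (PySem.Int.floordiv allowed a)
      else total) c = c + (l.map (cntB allowed)).sum := by
  intro l
  induction l with
  | nil => intro c; simp
  | cons a t ih =>
    intro c
    simp only [List.foldl_cons, List.map_cons, List.sum_cons]
    by_cases h : a ≤ allowed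
    · rw [if_pos h, ih]; unfold cntB; rw [if_pos h]; ring
    · rw [if_neg h, ih]; unfold cntB; rw [if_neg h]; ring

lemma sum_cntB_nonneg (allowed : Int) (l : List Int)
    (hPre : ∀ a ∈ l, 0 < a ∨ allowed < a) : 0 ≤ (l.map (cntB allowed)).sum := by
  induction l with
  | nil => simp
  | cons a t ih =>
    simp only [List.map_cons, List.sum_cons]
    have h1 := (chef_eq a allowed (hPre a (by simp))).2
    have h2 := ih (fun x hx => hPre x (by simp [hx]))
    omega

lemma go_eq (p allowed : Int) :
    ∀ (l : List Int) (c : Int), l ≠ [] → (∀ a ∈ l, 0 < a ∨ allowed < a) →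
    CanCookGo p allowed l c = decide (p ≤ c + (l.map (cntB allowed)).sum) := by
  intro l
  induction l with
  | nil => intro c h; exact absurd rfl h
  | cons a t ih =>
    intro c _ hPre
    have hchef := (chef_eq a allowed (hPre a (by simp))).1 c
    simp only [CanCookGo, hchef, List.map_cons, List.sum_cons]
    by_cases hp : p ≤ c + cntB allowed a
    · rw [if_pos hp]
      have hts : 0 ≤ (t.map (cntB allowed)).sum :=
        sum_cntB_nonneg allowed t (fun x hx => hPre x (by simp [hx]))
      have : p ≤ c + (cntB allowed a + (t.map (cntB allowed)).sum) := by omega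
      simp [this]
    · rw [if_neg hp]
      cases t with
      | nil =>
        simp only [CanCookGo, List.map_nil, List.sum_nil]
        have hnp : ¬ p ≤ c + (cntB allowed a + 0) := by omega
        simp
        omega
      | cons b t' =>
        rw [ih (c + cntB allowed a) (by simp) (fun x hx => hPre x (by simp [hx]))]
        congr 1
        simp only [List.map_cons, List.sum_cons]
        ring_nf

-- ===== VERDICT (by name: the statement is the Claim_ definition above) =====
theorem CanCook_spec : Claim_unchanged_CanCook := by
  intro arr p allowed _ hPre hD
  unfold CanCook CanCook_alt
  rw [foldl_cntB]
  cases arr with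
  | nil =>
    have hp : ¬ p ≤ 0 := fun h => hD ⟨rfl, h⟩
    simp [CanCookGo, hp]
  | cons a t =>
    rw [go_eq p allowed (a :: t) 0 (by simp) hPre]

theorem CanCook_changed : Claim_changed_CanCook := by
  unfold Claim_changed_CanCook; decide

theorem CanCook_tight : Claim_exact_CanCook := by
  intro arr p allowed _ _ hD
  rcases hD with ⟨harr, hp⟩
  subst harr
  unfold CanCook CanCook_alt
  simp [CanCookGo, hp]
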